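-- pv_equiv track=rewrite | github.com/astromar2187/trab_final_paa20251 | output/heuristica_dsaturn.py | dsatur_coloracao
-- ===== SOURCE A (Python) =====
-- def _calcular_graus_iniciais(grafo):
--     return {no: len(grafo[no]) for no in grafo.keys()}
--
-- def _obter_grau_saturacao(no, grafo, coloracoes):
--     cores_vizinhos = set()
--     for vizinho in grafo[no]:
--         if vizinho in coloracoes:
--             cores_vizinhos.add(coloracoes[vizinho])
--     return len(cores_vizinhos)
--
-- def _encontrar_proximo_no_a_colorir(nos_nao_coloridos, grafo, coloracoes, grau_original):
--     proximo_no = None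
--     max_saturacao = -1
--     max_grau_para_desempate = -1
--
--     for no in nos_nao_coloridos:
--         saturacao_atual = _obter_grau_saturacao(no, grafo, coloracoes)
--         grau_atual = grau_original[no]
--
--         if saturacao_atual > max_saturacao:
--             max_saturacao = saturacao_atual
--             max_grau_para_desempate = grau_atual
--             proximo_no = no
--         elif saturacao_atual == max_saturacao:
--             if grau_atual > max_grau_para_desempate:
--                 max_grau_para_desempate = grau_atual
--                 proximo_no = no
--     return proximo_no
--
-- def _encontrar_cor_disponivel(no, grafo, coloracoes):
--     cores_vizinhos = set(coloracoes[vizinho] for vizinho in grafo[no] if vizinho in coloracoes)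
--     cor_disponivel = 0
--     while cor_disponivel in cores_vizinhos:
--         cor_disponivel += 1
--     return cor_disponivel
--
-- def dsatur_coloracao(grafo):
--     nos = list(grafo.keys())
--     num_nos = len(nos)
--     coloracoes = {}
--
--     grau_original = _calcular_graus_iniciais(grafo)
--
--     k = 0
--
--     while len(coloracoes) < num_nos:
--         nos_nao_coloridos = [no for no in nos if no not in coloracoes]
--
--         if not nos_nao_coloridos:
--             break
--
--         x_k = _encontrar_proximo_no_a_colorir(nos_nao_coloridos, grafo, coloracoes, grau_original)
--
--         if x_k is None:
--             break
--
--         cor_atribuida = _encontrar_cor_disponivel(x_k, grafo, coloracoes)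
--         coloracoes[x_k] = cor_atribuida
--
--         k = max(k, cor_atribuida + 1)
--
--     return k, coloracoes, num_nos
-- ===== SOURCE B (Python) =====
-- def dsatur_coloracao(grafo):
--     # Incremental DSATUR: reverse adjacency + per-node saturation sets updated
--     # on each coloring, instead of recomputing every saturation each round.
--     nos = list(grafo.keys())
--     num_nos = len(nos)
--     grau = {no: len(grafo[no]) for no in nos}
--     rev = {no: [] for no in nos}
--     for u in nos:
--         for v in grafo[u]:
--             if v in rev:
--                 rev[v].append(u)
--     sat = {no: set() for no in nos}
--     coloracoes = {}
--     k = 0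
--     for _ in range(num_nos):
--         x = None
--         best_s = -1
--         best_g = -1
--         for no in nos:
--             if no in coloracoes:
--                 continue
--             s = len(sat[no])
--             g = grau[no]
--             if s > best_s or (s == best_s and g > best_g):
--                 best_s, best_g, x = s, g, no
--         cores = sat[x]
--         cor = next(c for c in range(len(cores) + 1) if c not in cores)
--         coloracoes[x] = cor
--         if cor + 1 > k:
--             k = cor + 1
--         for u in rev[x]:
--             if u not in coloracoes:
--                 sat[u].add(cor)
--     return k, coloracoes, num_nos
-- ===== Notes on version B (the rewrite author's own statement) =====
-- stated objective: faster
-- what changed: A recomputes every uncolored node's saturation set from scratch on every round (and rebuilds the chosen node's neighbor-color set again to pick its color); B builds a reverse-adjacency index once and maintains per-node saturation sets incrementally, updating only the neighbors of the node just colored, so each round is a plain O(V) scan.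
import Mathlib
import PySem

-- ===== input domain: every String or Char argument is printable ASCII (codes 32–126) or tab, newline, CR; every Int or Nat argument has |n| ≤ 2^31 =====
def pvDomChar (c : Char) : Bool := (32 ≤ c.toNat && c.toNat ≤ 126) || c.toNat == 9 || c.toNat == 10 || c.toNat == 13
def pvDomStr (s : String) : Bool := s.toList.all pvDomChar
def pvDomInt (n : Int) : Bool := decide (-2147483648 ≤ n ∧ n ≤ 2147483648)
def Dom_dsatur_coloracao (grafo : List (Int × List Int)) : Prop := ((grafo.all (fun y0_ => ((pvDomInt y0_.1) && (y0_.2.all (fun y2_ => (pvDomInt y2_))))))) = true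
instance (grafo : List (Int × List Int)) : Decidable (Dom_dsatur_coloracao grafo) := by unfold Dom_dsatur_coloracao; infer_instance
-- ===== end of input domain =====

-- B replaces A's per-round from-scratch saturation recomputation by a reverse-adjacency index and
-- incrementally maintained per-node saturation sets (equal RETURN value; neither mutates its input).

-- ===== PORT A =====

-- _calcular_graus_iniciais: {no: len(grafo[no]) for no in grafo.keys()}
-- (grafo[no] is ported as getD with default []; the default is never reached since no is a key)
def pvGrausA (g : PySem.Dict Int (List Int)) : PySem.Dict Int Int :=
  g.keys.foldl (fun d no => d.insert no (PySem.List.len (g.getD no []))) PySem.Dict.empty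

-- the set 'cores_vizinhos' built both in _obter_grau_saturacao and (same comprehension)
-- in _encontrar_cor_disponivel: colors of the already-colored neighbours of no
def pvSatSetA (no : Int) (g : PySem.Dict Int (List Int)) (col : PySem.Dict Int Int) : PySem.Set Int :=
  (g.getD no []).foldl
    (fun s v => if col.contains v then PySem.Set.add s (col.getD v 0) else s) PySem.Set.empty

-- _obter_grau_saturacao
def pvSatA (no : Int) (g : PySem.Dict Int (List Int)) (col : PySem.Dict Int Int) : Int :=
  PySem.Set.len (pvSatSetA no g col)

-- _encontrar_proximo_no_a_colorir: fold with accumulator (proximo_no, max_saturacao, max_grau)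
def pvNextA (unc : List Int) (g : PySem.Dict Int (List Int)) (col : PySem.Dict Int Int)
    (grau : PySem.Dict Int Int) : Option Int :=
  (unc.foldl
    (fun (acc : Option Int × Int × Int) no =>
      let s := pvSatA no g col
      let ga := grau.getD no 0
      if s > acc.2.1 then (some no, s, ga)
      else if s = acc.2.1 then (if ga > acc.2.2 then (some no, acc.2.1, ga) else acc)
      else acc)
    (none, -1, -1)).1

-- the 'while cor_disponivel in cores_vizinhos: cor_disponivel += 1' loop; fuel |cores|+1
-- suffices (proved below: the least colour not in a set of n colours is ≤ n)
def pvMexWhileA : Nat → Int → PySem.Set Int → Int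
  | 0, c, _ => c
  | fuel + 1, c, s => if PySem.Set.contains s c then pvMexWhileA fuel (c + 1) s else c

-- _encontrar_cor_disponivel
def pvCorA (no : Int) (g : PySem.Dict Int (List Int)) (col : PySem.Dict Int Int) : Int :=
  let cores := pvSatSetA no g col
  pvMexWhileA (cores.length + 1) 0 cores

-- the 'while len(coloracoes) < num_nos' loop; fuel = number of nodes (each pass colours one
-- node, so the Python loop makes at most that many passes)
def pvLoopA (g : PySem.Dict Int (List Int)) (nos : List Int) (grau : PySem.Dict Int Int) :
    Nat → PySem.Dict Int Int → Int → PySem.Dict Int Int × Int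
  | 0, col, k => (col, k)
  | fuel + 1, col, k =>
    if (col.size : Int) < PySem.List.len nos then
      let unc := nos.filter (fun no => !(col.contains no))
      if unc.isEmpty then (col, k)
      else
        match pvNextA unc g col grau with
        | none => (col, k)
        | some x =>
          let cor := pvCorA x g col
          pvLoopA g nos grau fuel (col.insert x cor) (max k (cor + 1))
    else (col, k)

def dsatur_coloracao (grafo : List (Int × List Int)) : Int × (List (Int × Int)) × Int :=
  let g := PySem.Dict.mk grafo
  let nos := g.keys
  let num := PySem.List.len nos
  let grau := pvGrausA g
  let r := pvLoopA g nos grau nos.length PySem.Dict.empty 0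
  (r.2, r.1.items, num)

-- ===== PORT B =====

-- grau = {no: len(grafo[no]) for no in nos}
def pvGrausB (g : PySem.Dict Int (List Int)) (nos : List Int) : PySem.Dict Int Int :=
  nos.foldl (fun d no => d.insert no (PySem.List.len (g.getD no []))) PySem.Dict.empty

-- rev = {no: [] for no in nos}; for u in nos: for v in grafo[u]: if v in rev: rev[v].append(u)
def pvRevB (g : PySem.Dict Int (List Int)) (nos : List Int) : PySem.Dict Int (List Int) :=
  let rev0 := nos.foldl (fun d no => d.insert no ([] : List Int)) PySem.Dict.empty
  nos.foldl
    (fun rev u =>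
      (g.getD u []).foldl
        (fun rev v => if rev.contains v then rev.modify v [] (fun l => l ++ [u]) else rev) rev)
    rev0

-- the inner selection scan: earliest uncoloured node with lexicographically largest (sat, grau)
def pvNextB (nos : List Int) (sat : PySem.Dict Int (PySem.Set Int))
    (grau : PySem.Dict Int Int) (col : PySem.Dict Int Int) : Option Int × Int × Int :=
  nos.foldl
    (fun (acc : Option Int × Int × Int) no =>
      if col.contains no then acc
      else
        let s := PySem.Set.len (sat.getD no [])
        let ga := grau.getD no 0
        if s > acc.2.1 ∨ (s = acc.2.1 ∧ ga > acc.2.2) then (some no, s, ga) else acc)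
    (none, -1, -1)

-- cor = next(c for c in range(len(cores) + 1) if c not in cores)
-- (the .getD 0 default is unreachable: among |cores|+1 distinct candidates one is free)
def pvMexB (cores : PySem.Set Int) : Int :=
  ((PySem.List.pyRange 0 (PySem.Set.len cores + 1) 1).find?
    (fun c => !(PySem.Set.contains cores c))).getD 0

-- for _ in range(num_nos): …  (n counts the remaining rounds; the x = None branch is
-- unreachable while a round remains, since an uncoloured node then exists)
def pvLoopB (nos : List Int) (grau : PySem.Dict Int Int) (rev : PySem.Dict Int (List Int)) :
    Nat → PySem.Dict Int (PySem.Set Int) → PySem.Dict Int Int → Int →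
    PySem.Dict Int Int × Int
  | 0, _, col, k => (col, k)
  | n + 1, sat, col, k =>
    match (pvNextB nos sat grau col).1 with
    | none => (col, k)
    | some x =>
      let cores := sat.getD x []
      let cor := pvMexB cores
      let col' := col.insert x cor
      let k' := if cor + 1 > k then cor + 1 else k
      let sat' := (rev.getD x []).foldl
        (fun s u => if col'.contains u then s else s.modify u [] (fun t => PySem.Set.add t cor))
        sat
      pvLoopB nos grau rev n sat' col' k'

def dsatur_coloracao_alt (grafo : List (Int × List Int)) : Int × (List (Int × Int)) × Int :=
  let g := PySem.Dict.mk grafo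
  let nos := g.keys
  let num := PySem.List.len nos
  let grau := pvGrausB g nos
  let rev := pvRevB g nos
  let sat0 := nos.foldl (fun d no => d.insert no PySem.Set.empty) PySem.Dict.empty
  let r := pvLoopB nos grau rev nos.length sat0 PySem.Dict.empty 0
  (r.2, r.1.items, num)

-- ===== PRECONDITION & SPEC =====
-- Pre_ excludes association lists with duplicate keys: a Python dict cannot have them, so the
-- assoc-list reading (first match) and the dict reading (last value wins) are both accidental there.
def Pre_dsatur_coloracao (grafo : List (Int × List Int)) : Prop :=
  (grafo.map Prod.fst).Nodup
instance (grafo : List (Int × List Int)) : Decidable (Pre_dsatur_coloracao grafo) := by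
  unfold Pre_dsatur_coloracao; infer_instance
def pvWitness_dsatur_coloracao : (List (Int × List Int)) :=
  [(0, [1, 2]), (1, [0, 2]), (2, [0, 1]), (3, [0])]

def Spec_dsatur_coloracao (grafo : List (Int × List Int)) (out : Int × (List (Int × Int)) × Int) : Prop := out = dsatur_coloracao_alt grafo
instance (grafo : List (Int × List Int)) (out : Int × (List (Int × Int)) × Int) : Decidable (Spec_dsatur_coloracao grafo out) := by unfold Spec_dsatur_coloracao; infer_instance

-- ===== CLAIM (what is proved, stated in full; the proofs are below) =====
def Claim_equal_dsatur_coloracao : Prop := ∀ (grafo : List (Int × List Int)), Dom_dsatur_coloracao grafo → Pre_dsatur_coloracao grafo → Spec_dsatur_coloracao grafo (dsatur_coloracao grafo)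

-- ===== LEMMAS AND PROOFS =====

-- the saturation set A recomputes is duplicate-free
lemma pv_foldadd_nodup (l : List Int) (col : PySem.Dict Int Int) (s : PySem.Set Int)
    (hs : s.Nodup) :
    (l.foldl (fun s v => if col.contains v then PySem.Set.add s (col.getD v 0) else s) s).Nodup := by
  induction l generalizing s with
  | nil => exact hs
  | cons a l ih =>
    simp only [List.foldl_cons]
    by_cases h : col.contains a
    · simp only [h, if_pos]; exact ih _ (PySem.Set.nodup_add _ _ hs)
    · simp only [h, Bool.false_eq_true, if_neg, not_false_iff]; exact ih _ hs

lemma pv_mem_foldadd (l : List Int) (col : PySem.Dict Int Int) (s : PySem.Set Int) (c : Int) :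
    c ∈ l.foldl (fun s v => if col.contains v then PySem.Set.add s (col.getD v 0) else s) s ↔
      c ∈ s ∨ ∃ v ∈ l, col.contains v = true ∧ col.getD v 0 = c := by
  induction l generalizing s with
  | nil => simp
  | cons a l ih =>
    simp only [List.foldl_cons]
    by_cases h : col.contains a
    · rw [if_pos h, ih, PySem.Set.mem_add]
      constructor
      · rintro (⟨hc | hc⟩ | ⟨v, hv, h1, h2⟩)
        · exact Or.inl hc
        · exact Or.inr ⟨a, List.mem_cons_self, h, hc.symm⟩
        · exact Or.inr ⟨v, List.mem_cons_of_mem _ hv, h1, h2⟩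
      · rintro (hc | ⟨v, hv, h1, h2⟩)
        · exact Or.inl (Or.inl hc)
        · rcases List.mem_cons.1 hv with rfl | hv
          · exact Or.inl (Or.inr h2.symm)
          · exact Or.inr ⟨v, hv, h1, h2⟩
    · rw [if_neg h, ih]
      constructor
      · rintro (hc | ⟨v, hv, h1, h2⟩)
        · exact Or.inl hc
        · exact Or.inr ⟨v, List.mem_cons_of_mem _ hv, h1, h2⟩
      · rintro (hc | ⟨v, hv, h1, h2⟩)
        · exact Or.inl hc
        · rcases List.mem_cons.1 hv with rfl | hv
          · exact absurd h1 (by simp [h])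
          · exact Or.inr ⟨v, hv, h1, h2⟩

lemma pv_satset_nodup (no : Int) (g : PySem.Dict Int (List Int)) (col : PySem.Dict Int Int) :
    (pvSatSetA no g col).Nodup :=
  pv_foldadd_nodup _ _ _ List.nodup_nil

lemma pv_mem_satset (no : Int) (g : PySem.Dict Int (List Int)) (col : PySem.Dict Int Int)
    (c : Int) :
    c ∈ pvSatSetA no g col ↔
      ∃ v ∈ g.getD no [], col.contains v = true ∧ col.getD v 0 = c := by
  unfold pvSatSetA
  rw [pv_mem_foldadd]
  simp [PySem.Set.empty]


-- A's colour-search while loop finds the least colour ≥ c missing from S, given enough fuel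
lemma pv_mexWhile_eq (S : PySem.Set Int) :
    ∀ (fuel : Nat) (c m : Int), c ≤ m → m ≤ c + fuel → m ∉ S →
      (∀ j, c ≤ j → j < m → j ∈ S) → pvMexWhileA fuel c S = m := by
  intro fuel
  induction fuel with
  | zero =>
    intro c m h1 h2 hm hj
    have : c = m := by push_cast at h2; omega
    simpa [pvMexWhileA] using this
  | succ f ih =>
    intro c m h1 h2 hm hj
    by_cases hc : c ∈ S
    · have hne : c ≠ m := fun e => hm (e ▸ hc)
      rw [pvMexWhileA, if_pos ((PySem.Set.contains_iff S c).2 hc)]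
      exact ih (c + 1) m (by omega) (by push_cast at h2 ⊢; omega) hm
        (fun j hj1 hj2 => hj j (by omega) hj2)
    · have hcm : c = m := by
        by_contra hne
        exact hc (hj c le_rfl (by omega))
      rw [pvMexWhileA, if_neg (by simp [hc])]
      exact hcm

-- the first hit of find? on range(0, b) satisfies the predicate and no smaller index does
lemma pv_find_pyRange_spec (b : Int) (q : Int → Bool) (c : Int)
    (h : (PySem.List.pyRange 0 b 1).find? q = some c) :
    q c = true ∧ 0 ≤ c ∧ c < b ∧ ∀ j, 0 ≤ j → j < c → q j = false := by
  rw [List.find?_eq_some_iff_append] at h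
  obtain ⟨hq, as, bs, heq, has⟩ := h
  have hmem : c ∈ PySem.List.pyRange 0 b 1 := by rw [heq]; simp
  have hc := PySem.List.mem_pyRange_one.1 hmem
  refine ⟨hq, hc.1, hc.2, ?_⟩
  intro j hj0 hjc
  have hjmem : j ∈ PySem.List.pyRange 0 b 1 :=
    PySem.List.mem_pyRange_one.2 ⟨hj0, by omega⟩
  rw [heq] at hjmem
  rcases List.mem_append.1 hjmem with h1 | h2
  · simpa using has j h1
  · exfalso
    have hpw := PySem.List.pairwise_lt_pyRange_one 0 b
    rw [heq] at hpw
    have hpw2 := (List.pairwise_append.1 hpw).2.1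
    rcases List.mem_cons.1 h2 with rfl | h2
    · omega
    · have := (List.pairwise_cons.1 hpw2).1 j h2; omega

-- B's colour choice: the least colour not in the (duplicate-free) set, and it is ≤ |S|
lemma pv_mexB_spec (S : PySem.Set Int) (_hS : S.Nodup) :
    pvMexB S ∉ S ∧ 0 ≤ pvMexB S ∧ pvMexB S ≤ (S.length : Int) ∧
      ∀ j, 0 ≤ j → j < pvMexB S → j ∈ S := by
  unfold pvMexB
  cases hfind : (PySem.List.pyRange 0 (PySem.Set.len S + 1) 1).find?
      (fun c => !(PySem.Set.contains S c)) with
  | none =>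
    exfalso
    rw [List.find?_eq_none] at hfind
    have hsub : PySem.List.pyRange 0 (PySem.Set.len S + 1) 1 ⊆ S := by
      intro x hx
      have := hfind x hx
      simp only [Bool.not_eq_true', Bool.not_eq_false] at this
      exact (PySem.Set.contains_iff S x).1 (by simpa using this)
    have hle := (List.subperm_of_subset (PySem.List.nodup_pyRange_one _ _) hsub).length_le
    rw [PySem.List.length_pyRange_one] at hle
    simp only [PySem.Set.len] at hle
    omega
  | some c =>
    obtain ⟨hq, h0, hlt, hfirst⟩ := pv_find_pyRange_spec _ _ _ hfind
    simp only [Option.getD_some]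
    have hq' : c ∉ S := by simpa using hq
    refine ⟨hq', h0, ?_, ?_⟩
    · simp only [PySem.Set.len] at hlt; omega
    · intro j hj0 hjc
      have hj := hfirst j hj0 hjc
      simpa using hj

-- the two colour computations agree on membership-equal duplicate-free sets
lemma pv_cor_eq (SA SB : PySem.Set Int) (hA : SA.Nodup) (hB : SB.Nodup)
    (hmem : ∀ c, c ∈ SB ↔ c ∈ SA) :
    pvMexWhileA (SA.length + 1) 0 SA = pvMexB SB := by
  have hlen : SB.length = SA.length :=
    ((List.perm_ext_iff_of_nodup hB hA).2 hmem).length_eq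
  obtain ⟨hnot, h0, hle, hall⟩ := pv_mexB_spec SB hB
  exact pv_mexWhile_eq SA (SA.length + 1) 0 (pvMexB SB) h0
    (by push_cast; omega)
    (fun hm => hnot ((hmem _).2 hm))
    (fun j hj1 hj2 => (hmem j).1 (hall j hj1 hj2))

-- the A-side selection step, named so the fold lemmas below can talk about it
def pvStepA (g : PySem.Dict Int (List Int)) (col : PySem.Dict Int Int)
    (grau : PySem.Dict Int Int) (acc : Option Int × Int × Int) (no : Int) :
    Option Int × Int × Int :=
  if pvSatA no g col > acc.2.1 then (some no, pvSatA no g col, grau.getD no 0)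
  else if pvSatA no g col = acc.2.1 then
    (if grau.getD no 0 > acc.2.2 then (some no, acc.2.1, grau.getD no 0) else acc)
  else acc

lemma pvNextA_eq (unc : List Int) (g : PySem.Dict Int (List Int)) (col grau : PySem.Dict Int Int) :
    pvNextA unc g col grau = (unc.foldl (pvStepA g col grau) (none, -1, -1)).1 := rfl

lemma pv_stepA_fst (g : PySem.Dict Int (List Int)) (col grau : PySem.Dict Int Int)
    (acc : Option Int × Int × Int) (no : Int) :
    (pvStepA g col grau acc no).1 = acc.1 ∨ (pvStepA g col grau acc no).1 = some no := by
  unfold pvStepA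
  split_ifs <;> simp

lemma pv_foldA_fst (g : PySem.Dict Int (List Int)) (col grau : PySem.Dict Int Int) :
    ∀ (l : List Int) (acc : Option Int × Int × Int),
      (l.foldl (pvStepA g col grau) acc).1 = acc.1 ∨
        ∃ x ∈ l, (l.foldl (pvStepA g col grau) acc).1 = some x := by
  intro l
  induction l with
  | nil => intro acc; exact Or.inl rfl
  | cons a l ih =>
    intro acc
    rw [List.foldl_cons]
    rcases ih (pvStepA g col grau acc a) with h | ⟨x, hx, h⟩
    · rcases pv_stepA_fst g col grau acc a with h2 | h2
      · exact Or.inl (h.trans h2)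
      · exact Or.inr ⟨a, List.mem_cons_self, h.trans h2⟩
    · exact Or.inr ⟨x, List.mem_cons_of_mem _ hx, h⟩

lemma pv_satA_nonneg (no : Int) (g : PySem.Dict Int (List Int)) (col : PySem.Dict Int Int) :
    0 ≤ pvSatA no g col := by
  simp [pvSatA, PySem.Set.len]

lemma pv_foldA_isSome (g : PySem.Dict Int (List Int)) (col grau : PySem.Dict Int Int) :
    ∀ (l : List Int) (acc : Option Int × Int × Int), acc.1.isSome →
      ((l.foldl (pvStepA g col grau) acc).1).isSome := by
  intro l
  induction l with
  | nil => intro acc h; exact h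
  | cons a l ih =>
    intro acc h
    rw [List.foldl_cons]
    apply ih
    rcases pv_stepA_fst g col grau acc a with h2 | h2 <;> simp [h2]
    exact h

lemma pv_next_isSome (unc : List Int) (g : PySem.Dict Int (List Int))
    (col grau : PySem.Dict Int Int) (h : unc ≠ []) :
    (pvNextA unc g col grau).isSome := by
  cases unc with
  | nil => exact absurd rfl h
  | cons a l =>
    rw [pvNextA_eq, List.foldl_cons]
    apply pv_foldA_isSome
    have hs : pvSatA a g col > (-1 : Int) := lt_of_lt_of_le (by norm_num) (pv_satA_nonneg a g col)
    simp [pvStepA, hs]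

lemma pv_next_mem (unc : List Int) (g : PySem.Dict Int (List Int))
    (col grau : PySem.Dict Int Int) (x : Int) (h : pvNextA unc g col grau = some x) :
    x ∈ unc := by
  rw [pvNextA_eq] at h
  rcases pv_foldA_fst g col grau unc (none, -1, -1) with h2 | ⟨y, hy, h2⟩
  · rw [h] at h2; exact absurd h2.symm (by simp)
  · rw [h] at h2
    obtain rfl : x = y := by simpa using h2
    exact hy

-- the B-side inner scan equals A's fold over the uncoloured sublist, under the
-- saturation-set invariant
lemma pv_sel_eq (g : PySem.Dict Int (List Int)) (grau col : PySem.Dict Int Int)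
    (sat : PySem.Dict Int (PySem.Set Int)) (nos : List Int)
    (hinv : ∀ no ∈ nos, col.contains no = false →
      (sat.getD no []).Nodup ∧ ∀ c, c ∈ sat.getD no [] ↔ c ∈ pvSatSetA no g col) :
    pvNextB nos sat grau col =
      (nos.filter (fun no => !(col.contains no))).foldl (pvStepA g col grau) (none, -1, -1) := by
  unfold pvNextB
  have hfun : (fun (acc : Option Int × Int × Int) (no : Int) =>
      if col.contains no then acc
      else
        let s := PySem.Set.len (sat.getD no [])
        let ga := grau.getD no 0
        if s > acc.2.1 ∨ (s = acc.2.1 ∧ ga > acc.2.2) then (some no, s, ga) else acc) =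
      (fun acc no =>
        if (!(col.contains no)) = true then
          (let s := PySem.Set.len (sat.getD no [])
           let ga := grau.getD no 0
           if s > acc.2.1 ∨ (s = acc.2.1 ∧ ga > acc.2.2) then (some no, s, ga) else acc)
        else acc) := by
    funext acc no
    by_cases h : col.contains no <;> simp [h]
  rw [hfun, PySem.List.foldl_if_eq_foldl_filter]
  apply PySem.List.foldl_congr_mem
  intro acc no hno
  rw [List.mem_filter] at hno
  obtain ⟨hnos, hcol⟩ := hno
  have hcol' : col.contains no = false := by simpa using hcol
  obtain ⟨hnd, hmem⟩ := hinv no hnos hcol'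
  have hlen : PySem.Set.len (sat.getD no []) = pvSatA no g col := by
    have := ((List.perm_ext_iff_of_nodup hnd (pv_satset_nodup no g col)).2 hmem).length_eq
    simp [PySem.Set.len, pvSatA, this]
  simp only [hlen, pvStepA]
  by_cases h1 : pvSatA no g col > acc.2.1
  · simp [h1]
  · by_cases h2 : pvSatA no g col = acc.2.1
    · by_cases h3 : grau.getD no 0 > acc.2.2
      · simp [h2, h3]
      · simp [h2, h3]
    · simp [h1, h2]

-- a dict built by inserting [] at every key reads [] everywhere
lemma pv_getD_insert_nil (nos : List Int) :
    ∀ (d : PySem.Dict Int (List Int)), (∀ w, d.getD w [] = []) →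
      ∀ w, (nos.foldl (fun d no => d.insert no ([] : List Int)) d).getD w [] = [] := by
  induction nos with
  | nil => intro d h w; exact h w
  | cons a l ih =>
    intro d h w
    rw [List.foldl_cons]
    refine ih _ ?_ w
    intro w'
    rw [PySem.Dict.getD_insert]
    split_ifs
    · rfl
    · exact h w'

lemma pv_contains_insert_nil (nos : List Int) (w : Int) :
    (nos.foldl (fun d no => d.insert no ([] : List Int)) PySem.Dict.empty).contains w = true ↔
      w ∈ nos := by
  rw [PySem.Dict.contains_iff_mem_keys,
    PySem.Dict.keys_foldl_insert nos (fun _ _ => ([] : List Int)) PySem.Dict.empty]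
  have h0 : (PySem.Dict.empty : PySem.Dict Int (List Int)).keys = [] := rfl
  rw [h0, PySem.Set.update_nil_left, PySem.Set.mem_ofList]

-- the inner reverse-adjacency pass: what ends up in each bucket
lemma pv_rev_inner (nos : List Int) (u : Int) (adj : List Int) :
    ∀ (rev : PySem.Dict Int (List Int)),
      (∀ w, rev.contains w = true ↔ w ∈ nos) →
      (∀ w, ((adj.foldl
          (fun r v => if r.contains v then r.modify v [] (fun l => l ++ [u]) else r) rev).contains w = true ↔
          w ∈ nos)) ∧
      (∀ w u', u' ∈ (adj.foldl
          (fun r v => if r.contains v then r.modify v [] (fun l => l ++ [u]) else r) rev).getD w [] ↔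
          u' ∈ rev.getD w [] ∨ (w ∈ nos ∧ w ∈ adj ∧ u' = u)) := by
  induction adj with
  | nil => intro rev hc; exact ⟨hc, fun w u' => by simp⟩
  | cons v adj ih =>
    intro rev hc
    rw [List.foldl_cons] at *
    by_cases hv : rev.contains v
    · rw [if_pos hv]
      have hvnos : v ∈ nos := (hc v).1 hv
      have hc' : ∀ w, (rev.modify v [] (fun l => l ++ [u])).contains w = true ↔ w ∈ nos := by
        intro w
        rw [PySem.Dict.contains_modify]
        constructor
        · intro h
          rcases Bool.or_eq_true_iff.1 h with h | h
          · obtain rfl : w = v := by simpa using h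
            exact hvnos
          · exact (hc w).1 h
        · intro h
          rw [Bool.or_eq_true_iff]
          exact Or.inr ((hc w).2 h)
      obtain ⟨ihc, ihm⟩ := ih _ hc'
      refine ⟨ihc, fun w u' => ?_⟩
      rw [ihm w u', PySem.Dict.getD_modify]
      by_cases hwv : w = v
      · subst hwv
        rw [if_pos rfl]
        simp only [List.mem_append, List.mem_cons, List.not_mem_nil, or_false]
        tauto
      · rw [if_neg hwv]
        simp only [List.mem_cons]
        constructor
        · rintro (h | ⟨h1, h2, h3⟩)
          · exact Or.inl h
          · exact Or.inr ⟨h1, Or.inr h2, h3⟩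
        · rintro (h | ⟨h1, (h2 | h2), h3⟩)
          · exact Or.inl h
          · exact absurd h2 hwv
          · exact Or.inr ⟨h1, h2, h3⟩
    · rw [if_neg hv]
      have hvnos : v ∉ nos := fun h => hv ((hc v).2 h)
      obtain ⟨ihc, ihm⟩ := ih _ hc
      refine ⟨ihc, fun w u' => ?_⟩
      rw [ihm w u']
      simp only [List.mem_cons]
      constructor
      · rintro (h | ⟨h1, h2, h3⟩)
        · exact Or.inl h
        · exact Or.inr ⟨h1, Or.inr h2, h3⟩
      · rintro (h | ⟨h1, (h2 | h2), h3⟩)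
        · exact Or.inl h
        · exact absurd (h2 ▸ h1) hvnos
        · exact Or.inr ⟨h1, h2, h3⟩

-- the reverse-adjacency index is exact: u is in bucket x iff edge x ∈ grafo[u]
lemma pv_rev_mem (g : PySem.Dict Int (List Int)) (nos : List Int) (x u : Int) :
    u ∈ (pvRevB g nos).getD x [] ↔ x ∈ nos ∧ u ∈ nos ∧ x ∈ g.getD u [] := by
  unfold pvRevB
  have main : ∀ (us : List Int) (rev : PySem.Dict Int (List Int)),
      (∀ w, rev.contains w = true ↔ w ∈ nos) →
      ∀ (Q : Int → Int → Prop), (∀ w u', u' ∈ rev.getD w [] ↔ Q w u') →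
      ∀ w u', u' ∈ (us.foldl
          (fun rev u => (g.getD u []).foldl
            (fun r v => if r.contains v then r.modify v [] (fun l => l ++ [u]) else r) rev)
          rev).getD w [] ↔
        Q w u' ∨ (w ∈ nos ∧ u' ∈ us ∧ w ∈ g.getD u' []) := by
    intro us
    induction us with
    | nil => intro rev hc Q hQ w u'; simp [hQ w u']
    | cons a us ih =>
      intro rev hc Q hQ w u'
      rw [List.foldl_cons]
      obtain ⟨hc', hm'⟩ := pv_rev_inner nos a (g.getD a []) rev hc
      rw [ih _ hc' (fun w u' => u' ∈ rev.getD w [] ∨ (w ∈ nos ∧ w ∈ g.getD a [] ∧ u' = a))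
        (fun w u' => hm' w u') w u', hQ w u']
      simp only [List.mem_cons]
      constructor
      · rintro ((h | ⟨h1, h2, rfl⟩) | ⟨h1, h2, h3⟩)
        · exact Or.inl h
        · exact Or.inr ⟨h1, Or.inl rfl, h2⟩
        · exact Or.inr ⟨h1, Or.inr h2, h3⟩
      · rintro (h | ⟨h1, (rfl | h2), h3⟩)
        · exact Or.inl (Or.inl h)
        · exact Or.inl (Or.inr ⟨h1, h3, rfl⟩)
        · exact Or.inr ⟨h1, h2, h3⟩
  rw [main nos _ (fun w => pv_contains_insert_nil nos w) (fun _ _ => False)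
    (fun w u' => by rw [pv_getD_insert_nil nos PySem.Dict.empty (fun w => rfl) w]; simp)]
  simp only [false_or]

-- B's incremental update after colouring: which saturation sets gain the new colour
lemma pv_sat_upd_mem (cor : Int) (col' : PySem.Dict Int Int) (revx : List Int) :
    ∀ (sat : PySem.Dict Int (PySem.Set Int)) (u c : Int),
      c ∈ (revx.foldl
        (fun s u => if col'.contains u then s else s.modify u [] (fun t => PySem.Set.add t cor))
        sat).getD u [] ↔
      c ∈ sat.getD u [] ∨ (u ∈ revx ∧ col'.contains u = false ∧ c = cor) := by
  induction revx with
  | nil => intro sat u c; simp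
  | cons a revx ih =>
    intro sat u c
    rw [List.foldl_cons]
    by_cases ha : col'.contains a
    · rw [if_pos ha, ih]
      simp only [List.mem_cons]
      constructor
      · rintro (h | ⟨h1, h2, h3⟩)
        · exact Or.inl h
        · exact Or.inr ⟨Or.inr h1, h2, h3⟩
      · rintro (h | ⟨(rfl | h1), h2, h3⟩)
        · exact Or.inl h
        · exact absurd ha (by simp [h2])
        · exact Or.inr ⟨h1, h2, h3⟩
    · rw [if_neg ha, ih]
      rw [PySem.Dict.getD_modify]
      simp only [List.mem_cons]
      by_cases hua : u = a
      · subst hua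
        rw [if_pos rfl, PySem.Set.mem_add]
        constructor
        · rintro ((h | h) | ⟨h1, h2, h3⟩)
          · exact Or.inl h
          · exact Or.inr ⟨Or.inl rfl, by simpa using ha, h⟩
          · exact Or.inr ⟨Or.inr h1, h2, h3⟩
        · rintro (h | ⟨(h1 | h1), h2, h3⟩)
          · exact Or.inl (Or.inl h)
          · exact Or.inl (Or.inr h3)
          · exact Or.inr ⟨h1, h2, h3⟩
      · rw [if_neg hua]
        constructor
        · rintro (h | ⟨h1, h2, h3⟩)
          · exact Or.inl h
          · exact Or.inr ⟨Or.inr h1, h2, h3⟩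
        · rintro (h | ⟨(h1 | h1), h2, h3⟩)
          · exact Or.inl h
          · exact absurd h1 hua
          · exact Or.inr ⟨h1, h2, h3⟩

lemma pv_sat_upd_nodup (cor : Int) (col' : PySem.Dict Int Int) (revx : List Int) :
    ∀ (sat : PySem.Dict Int (PySem.Set Int)) (u : Int), (sat.getD u []).Nodup →
      ((revx.foldl
        (fun s u => if col'.contains u then s else s.modify u [] (fun t => PySem.Set.add t cor))
        sat).getD u []).Nodup := by
  induction revx with
  | nil => intro sat u h; exact h
  | cons a revx ih =>
    intro sat u h
    rw [List.foldl_cons]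
    by_cases ha : col'.contains a
    · rw [if_pos ha]; exact ih _ _ h
    · rw [if_neg ha]
      apply ih
      rw [PySem.Dict.getD_modify]
      split_ifs with hua
      · subst hua; exact PySem.Set.nodup_add _ _ h
      · exact h

-- how A's recomputed saturation set changes when one more node is coloured
lemma pv_satset_insert (no x cor : Int) (g : PySem.Dict Int (List Int))
    (col : PySem.Dict Int Int) (hx : col.contains x = false) (c : Int) :
    c ∈ pvSatSetA no g (col.insert x cor) ↔
      c ∈ pvSatSetA no g col ∨ (x ∈ g.getD no [] ∧ c = cor) := by
  rw [pv_mem_satset, pv_mem_satset]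
  constructor
  · rintro ⟨v, hv, h1, h2⟩
    rw [PySem.Dict.contains_insert] at h1
    rcases Bool.or_eq_true_iff.1 h1 with h | h
    · obtain rfl : v = x := by simpa using h
      rw [PySem.Dict.getD_insert, if_pos rfl] at h2
      exact Or.inr ⟨hv, h2.symm⟩
    · have hvx : v ≠ x := by rintro rfl; rw [hx] at h; exact Bool.false_ne_true h
      rw [PySem.Dict.getD_insert, if_neg hvx] at h2
      exact Or.inl ⟨v, hv, h, h2⟩
  · rintro (⟨v, hv, h1, h2⟩ | ⟨hv, rfl⟩)
    · have hvx : v ≠ x := by rintro rfl; rw [hx] at h1; exact Bool.false_ne_true h1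
      refine ⟨v, hv, ?_, ?_⟩
      · rw [PySem.Dict.contains_insert, Bool.or_eq_true_iff]; exact Or.inr h1
      · rw [PySem.Dict.getD_insert, if_neg hvx]; exact h2
    · refine ⟨x, hv, ?_, ?_⟩
      · rw [PySem.Dict.contains_insert]; simp
      · rw [PySem.Dict.getD_insert, if_pos rfl]

-- the max-update of k written as Python B writes it
lemma pv_max_eq (k cor : Int) : max k (cor + 1) = if cor + 1 > k then cor + 1 else k := by
  split_ifs with h
  · exact max_eq_right (by omega)
  · exact max_eq_left (by omega)

-- the heart of the proof: with the saturation invariant, both main loops march in lockstep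
lemma pv_loop_eq (g : PySem.Dict Int (List Int)) (nos : List Int) (grau : PySem.Dict Int Int)
    (hnd : nos.Nodup) :
    ∀ (n : Nat) (col : PySem.Dict Int Int) (sat : PySem.Dict Int (PySem.Set Int)) (k : Int),
      col.keys.Nodup → (∀ y ∈ col.keys, y ∈ nos) → col.size + n = nos.length →
      (∀ no ∈ nos, col.contains no = false →
        (sat.getD no []).Nodup ∧ ∀ c, c ∈ sat.getD no [] ↔ c ∈ pvSatSetA no g col) →
      pvLoopA g nos grau n col k = pvLoopB nos grau (pvRevB g nos) n sat col k := by
  intro n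
  induction n with
  | zero => intro col sat k _ _ _ _; rfl
  | succ n ih =>
    intro col sat k hknd hsub hsize hinv
    have hcond : (col.size : Int) < PySem.List.len nos := by
      rw [PySem.List.len_eq]; exact_mod_cast by omega
    have hkeyslen : col.keys.length = col.size := by
      simp [PySem.Dict.keys, PySem.Dict.size]
    have hex : ∃ no ∈ nos, col.contains no = false := by
      by_contra hno
      push Not at hno
      have hsubset : nos ⊆ col.keys := by
        intro y hy
        rw [← PySem.Dict.contains_iff_mem_keys]
        cases hcy : col.contains y with
        | false => exact absurd hcy (hno y hy)
        | true => rfl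
      have := (List.subperm_of_subset hnd hsubset).length_le
      omega
    obtain ⟨w, hwnos, hwcol⟩ := hex
    have hwunc : w ∈ nos.filter (fun no => !(col.contains no)) := by
      rw [List.mem_filter]; exact ⟨hwnos, by simp [hwcol]⟩
    have huncne : nos.filter (fun no => !(col.contains no)) ≠ [] := by
      intro h; rw [h] at hwunc; exact List.not_mem_nil hwunc
    obtain ⟨x, hx⟩ := Option.isSome_iff_exists.1
      (pv_next_isSome (nos.filter (fun no => !(col.contains no))) g col grau huncne)
    have hxunc := pv_next_mem _ g col grau x hx
    have hxnos : x ∈ nos := (List.mem_filter.1 hxunc).1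
    have hxcol : col.contains x = false := by simpa using (List.mem_filter.1 hxunc).2
    have hsel : (pvNextB nos sat grau col).1 = some x := by
      rw [pv_sel_eq g grau col sat nos hinv, ← pvNextA_eq, hx]
    obtain ⟨hxnd, hxmem⟩ := hinv x hxnos hxcol
    have hcor : pvMexB (sat.getD x []) = pvCorA x g col :=
      (pv_cor_eq (pvSatSetA x g col) (sat.getD x []) (pv_satset_nodup x g col) hxnd hxmem).symm
    have huncempty : (nos.filter (fun no => !(col.contains no))).isEmpty = false := by
      rw [List.isEmpty_eq_false_iff]; exact huncne
    -- one step of A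
    rw [pvLoopA, if_pos hcond]
    simp only [huncempty, Bool.false_eq_true, if_neg, not_false_iff, hx]
    -- one step of B
    rw [pvLoopB]
    simp only [hsel, hcor, pv_max_eq k (pvCorA x g col)]
    -- apply the induction hypothesis to the new state
    apply ih
    · exact PySem.Dict.nodup_keys_insert col x (pvCorA x g col) hknd
    · intro y hy
      rcases (PySem.Dict.mem_keys_insert col x y (pvCorA x g col)).1 hy with rfl | hy
      · exact hxnos
      · exact hsub y hy
    · rw [PySem.Dict.size_insert, if_neg (by simp [hxcol])]
      omega
    · intro no hno hno'
      have hnox : no ≠ x := by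
        intro rfl
        rw [PySem.Dict.contains_insert] at hno'
        simp at hno'
      have hnocol : col.contains no = false := by
        rw [PySem.Dict.contains_insert] at hno'
        simpa [hnox] using hno'
      obtain ⟨hnd2, hmem2⟩ := hinv no hno hnocol
      constructor
      · exact pv_sat_upd_nodup _ _ _ sat no hnd2
      · intro c
        rw [pv_sat_upd_mem, hmem2, pv_rev_mem g nos x no,
          pv_satset_insert no x (pvCorA x g col) g col hxcol c]
        constructor
        · rintro (h | ⟨⟨h1, h2, h3⟩, h4, h5⟩)
          · exact Or.inl h
          · exact Or.inr ⟨h3, h5⟩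
        · rintro (h | ⟨h1, h2⟩)
          · exact Or.inl h
          · exact Or.inr ⟨⟨hxnos, hno, h1⟩, hno', h2⟩

-- the initial saturation dict reads the empty set everywhere
lemma pv_sat0_getD (nos : List Int) (w : Int) :
    ((nos.foldl (fun d no => d.insert no PySem.Set.empty) PySem.Dict.empty).getD w
      ([] : PySem.Set Int)) = [] :=
  pv_getD_insert_nil nos PySem.Dict.empty (fun _ => rfl) w

lemma pv_satset_empty (no : Int) (g : PySem.Dict Int (List Int)) (c : Int) :
    c ∉ pvSatSetA no g PySem.Dict.empty := by
  rw [pv_mem_satset]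
  rintro ⟨v, _, h1, _⟩
  rw [PySem.Dict.contains_empty] at h1
  exact Bool.false_ne_true h1

-- ===== VERDICT (by name: the statement is the Claim_ definition above) =====
theorem dsatur_coloracao_spec : Claim_equal_dsatur_coloracao := by
  intro grafo _ hpre
  unfold Spec_dsatur_coloracao dsatur_coloracao dsatur_coloracao_alt
  dsimp only
  have hnd : (PySem.Dict.mk grafo).keys.Nodup := by
    rw [PySem.Dict.keys_mk]; exact hpre
  have hloop := pv_loop_eq (PySem.Dict.mk grafo) (PySem.Dict.mk grafo).keys
    (pvGrausA (PySem.Dict.mk grafo)) hnd (PySem.Dict.mk grafo).keys.length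
    PySem.Dict.empty
    ((PySem.Dict.mk grafo).keys.foldl (fun d no => d.insert no PySem.Set.empty) PySem.Dict.empty)
    0
    (List.nodup_nil)
    (by intro y hy; exact absurd hy List.not_mem_nil)
    (Nat.zero_add _)
    (by
      intro no hno _
      rw [pv_sat0_getD]
      exact ⟨List.nodup_nil, fun c => by
        simp only [List.not_mem_nil, false_iff]
        exact pv_satset_empty no (PySem.Dict.mk grafo) c⟩)
  rw [hloop]
  rfl
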